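-- pv_equiv track=rewrite | github.com/CS-Amritha/Daily-Programming-Challenge-2024 | Challenge22.py | find_first_k_repeats
-- ===== SOURCE A (Python) =====
-- def find_first_k_repeats(nums, k):
--     freq = {}
--     for n in nums:
--         if n in freq:
--             freq[n] += 1
--         else:
--             freq[n] = 1
--     for n in nums:
--         if freq[n] == k:
--             return n
--     return -1
-- ===== SOURCE B (Python) =====
-- def find_first_k_repeats(nums, k):
--     # One pass aggregates each distinct value's (count, first index); the answer is
--     # the arg-min by first index among values whose count is exactly k, else -1.
--     stats = {}
--     for i, n in enumerate(nums):
--         c, f = stats.get(n, (0, i))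
--         stats[n] = (c + 1, f)
--     best, best_i = -1, len(nums)
--     for n, (c, f) in stats.items():
--         if c == k and f < best_i:
--             best, best_i = n, f
--     return best
-- ===== Notes on version B (the rewrite author's own statement) =====
-- stated objective: alternative
-- what changed: Replaces A's build-table-then-rescan-the-list strategy by a single aggregation pass recording (count, first index) per distinct value, followed by an arg-min over the distinct-value records: the result is the minimal-first-index value whose count is k, so the input list is never rescanned.
import Mathlib
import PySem

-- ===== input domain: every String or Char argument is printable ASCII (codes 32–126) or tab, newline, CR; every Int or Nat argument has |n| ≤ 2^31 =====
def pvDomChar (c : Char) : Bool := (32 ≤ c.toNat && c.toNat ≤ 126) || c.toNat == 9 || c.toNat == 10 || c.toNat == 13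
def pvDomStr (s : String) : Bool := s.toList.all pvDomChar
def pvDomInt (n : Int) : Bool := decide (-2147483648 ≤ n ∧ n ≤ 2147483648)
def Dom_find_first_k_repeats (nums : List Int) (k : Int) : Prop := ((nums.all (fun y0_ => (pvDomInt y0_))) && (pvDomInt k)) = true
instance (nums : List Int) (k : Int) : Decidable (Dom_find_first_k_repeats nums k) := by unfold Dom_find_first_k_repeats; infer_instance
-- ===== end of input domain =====

-- B replaces A's build-counts-then-rescan-the-list strategy by one aggregation pass recording
-- (count, first index) per distinct value followed by an arg-min by first index over those
-- records (alternative algorithm, same asymptotic cost).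

-- ===== PORT A =====
-- first loop of A: build the frequency dict
def pvBuildFreqA (nums : List Int) : PySem.Dict Int Int :=
  nums.foldl (fun d n => if d.contains n then d.insert n (d.getD n 0 + 1) else d.insert n 1)
    PySem.Dict.empty

-- second loop of A: first n with freq[n] == k, else -1 (every n scanned is a key of freq)
def pvScanA (freq : PySem.Dict Int Int) (k : Int) : List Int → Int
  | [] => -1
  | n :: rest => if freq.getD n 0 = k then n else pvScanA freq k rest

def find_first_k_repeats (nums : List Int) (k : Int) : Int :=
  pvScanA (pvBuildFreqA nums) k nums

-- ===== PORT B =====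
-- first loop of B: value ↦ (count, first index), aggregated in one enumerate pass
def pvBuildB (nums : List Int) : PySem.Dict Int (Int × Int) :=
  (PySem.List.enumerate nums).foldl
    (fun d p => d.insert p.2 ((d.getD p.2 (0, p.1)).1 + 1, (d.getD p.2 (0, p.1)).2))
    PySem.Dict.empty

-- second loop of B: arg-min by first index among records with count k
def pvSelB (k : Int) (s : Int × Int) (e : Int × (Int × Int)) : Int × Int :=
  if e.2.1 = k ∧ e.2.2 < s.2 then (e.1, e.2.2) else s

def find_first_k_repeats_alt (nums : List Int) (k : Int) : Int :=
  ((pvBuildB nums).items.foldl (pvSelB k) (-1, (nums.length : Int))).1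

-- ===== PRECONDITION & SPEC =====
def Spec_find_first_k_repeats (nums : List Int) (k : Int) (out : Int) : Prop := out = find_first_k_repeats_alt nums k
instance (nums : List Int) (k : Int) (out : Int) : Decidable (Spec_find_first_k_repeats nums k out) := by unfold Spec_find_first_k_repeats; infer_instance

-- ===== CLAIM (what is proved, stated in full; the proofs are below) =====
def Claim_equal_find_first_k_repeats : Prop := ∀ (nums : List Int) (k : Int), Dom_find_first_k_repeats nums k → Spec_find_first_k_repeats nums k (find_first_k_repeats nums k)

-- ===== LEMMAS AND PROOFS =====

-- ---- A's side: its scan is the first n in nums with nums.count n = k, as a find? ----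

theorem pvBuildFreqA_eq_counter (nums : List Int) :
    pvBuildFreqA nums = PySem.Dict.counter nums := by
  rw [← PySem.Dict.foldl_insert_getD_add_one_eq_counter]
  unfold pvBuildFreqA
  congr 1
  funext d n
  by_cases h : d.contains n = true
  · simp [h]
  · simp only [Bool.not_eq_true] at h
    simp [h, PySem.Dict.getD_of_not_contains d 0 h]

theorem pvScanA_counter_eq_find? (nums : List Int) (k : Int) (l : List Int) :
    pvScanA (PySem.Dict.counter nums) k l
      = (l.find? (fun n => (nums.count n : Int) == k)).getD (-1) := by
  induction l with
  | nil => rfl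
  | cons n rest ih =>
    simp only [pvScanA, List.find?_cons, PySem.Dict.getD_counter]
    by_cases h : (nums.count n : Int) = k
    · have hb : ((nums.count n : Int) == k) = true := by simp [h]
      rw [if_pos h, hb]
      rfl
    · have hb : ((nums.count n : Int) == k) = false := by simp [h]
      rw [if_neg h, hb, ih]

-- ---- B's build loop: keys, lookups, items ----

theorem pvBuildB_keys (nums : List Int) :
    (pvBuildB nums).keys = PySem.Set.ofList nums := by
  unfold pvBuildB
  rw [PySem.Dict.keys_foldl_insert_key
        (key := fun p : Int × Int => p.2)
        (f := fun d p => ((d.getD p.2 (0, p.1)).1 + 1, (d.getD p.2 (0, p.1)).2))]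
  simp [PySem.List.map_snd_enumerate, PySem.Dict.keys_empty, PySem.Set.update,
        PySem.Set.ofList_eq_foldl]

theorem pvBuildB_nodup_keys (nums : List Int) : (pvBuildB nums).keys.Nodup := by
  unfold pvBuildB
  exact PySem.Dict.nodup_keys_foldl_insert_key _ _ _ _ PySem.Dict.nodup_keys_empty

theorem pvBuildB_append (xs : List Int) (x : Int) :
    pvBuildB (xs ++ [x])
      = (pvBuildB xs).insert x
          (((pvBuildB xs).getD x (0, (xs.length : Int))).1 + 1,
           ((pvBuildB xs).getD x (0, (xs.length : Int))).2) := by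
  unfold pvBuildB
  rw [PySem.List.enumerate_append, List.foldl_append]
  simp [PySem.List.enumerate_cons, PySem.List.enumerate_nil]

theorem pvBuildB_get? (nums : List Int) :
    ∀ v ∈ nums,
      (pvBuildB nums).get? v = some ((nums.count v : Int), (nums.idxOf v : Int)) := by
  induction nums using List.reverseRecOn with
  | nil => intro v hv; cases hv
  | append_singleton xs x ih =>
    intro v hv
    rw [pvBuildB_append]
    by_cases hx : x ∈ xs
    · have hgx : (pvBuildB xs).getD x (0, (xs.length : Int))
          = ((xs.count x : Int), (xs.idxOf x : Int)) := by
        rw [PySem.Dict.getD_eq_get?_getD, ih x hx]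
        rfl
      by_cases hvx : v = x
      · subst hvx
        rw [hgx, PySem.Dict.get?_insert_self]
        have h1 : (xs ++ [v]).count v = xs.count v + 1 := by simp
        have h2 : (xs ++ [v]).idxOf v = xs.idxOf v := List.idxOf_append_of_mem hx
        rw [h1, h2]
        push_cast
        ring_nf
      · have hvxs : v ∈ xs := by
          rcases List.mem_append.mp hv with h | h
          · exact h
          · simp at h; exact absurd h hvx
        rw [PySem.Dict.get?_insert, if_neg hvx, ih v hvxs]
        have h1 : (xs ++ [x]).count v = xs.count v := by
          simp [List.count_append, List.count_singleton]
          intro h; exact absurd h.symm hvx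
        have h2 : (xs ++ [x]).idxOf v = xs.idxOf v := List.idxOf_append_of_mem hvxs
        rw [h1, h2]
    · have hnone : (pvBuildB xs).get? x = none := by
        rw [PySem.Dict.get?_eq_none_iff_not_mem_keys, pvBuildB_keys]
        simpa [PySem.Set.mem_ofList] using hx
      have hgx : (pvBuildB xs).getD x (0, (xs.length : Int)) = (0, (xs.length : Int)) := by
        rw [PySem.Dict.getD_eq_get?_getD, hnone]
        rfl
      by_cases hvx : v = x
      · subst hvx
        rw [hgx, PySem.Dict.get?_insert_self]
        have h1 : (xs ++ [v]).count v = 1 := by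
          simp [List.count_append, List.count_eq_zero_of_not_mem hx]
        have h2 : (xs ++ [v]).idxOf v = xs.length := by
          rw [List.idxOf_append_of_notMem hx]; simp
        rw [h1, h2]
        norm_num
      · have hvxs : v ∈ xs := by
          rcases List.mem_append.mp hv with h | h
          · exact h
          · simp at h; exact absurd h hvx
        rw [PySem.Dict.get?_insert, if_neg hvx, ih v hvxs]
        have h1 : (xs ++ [x]).count v = xs.count v := by
          simp [List.count_append, List.count_singleton]
          intro h; exact absurd h.symm hvx
        have h2 : (xs ++ [x]).idxOf v = xs.idxOf v := List.idxOf_append_of_mem hvxs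
        rw [h1, h2]

theorem pvBuildB_items (nums : List Int) :
    (pvBuildB nums).items
      = (PySem.Set.ofList nums).map
          (fun v => (v, ((nums.count v : Int), (nums.idxOf v : Int)))) := by
  rw [PySem.Dict.items_eq_map_keys (pvBuildB nums) (pvBuildB_nodup_keys nums) ((0 : Int), (0 : Int)),
      pvBuildB_keys]
  apply List.map_congr_left
  intro v hv
  have hvm : v ∈ nums := (PySem.Set.mem_ofList nums v).mp hv
  rw [PySem.Dict.getD_eq_get?_getD, pvBuildB_get? nums v hvm]
  rfl

-- ---- first indices over the first-occurrence dedup list are strictly increasing ----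
theorem ofList_append_singleton (xs : List Int) (x : Int) :
    PySem.Set.ofList (xs ++ [x]) = PySem.Set.add (PySem.Set.ofList xs) x := by
  rw [PySem.Set.ofList_eq_foldl, List.foldl_append, ← PySem.Set.ofList_eq_foldl]
  rfl

theorem ofList_idx_pairwise (nums : List Int) :
    (PySem.Set.ofList nums).Pairwise (fun a b => nums.idxOf a < nums.idxOf b) := by
  induction nums using List.reverseRecOn with
  | nil => simp [PySem.Set.ofList]
  | append_singleton xs x ih =>
    rw [ofList_append_singleton]
    by_cases hx : x ∈ xs
    · have hmem : x ∈ PySem.Set.ofList xs := (PySem.Set.mem_ofList xs x).mpr hx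
      have hadd : PySem.Set.add (PySem.Set.ofList xs) x = PySem.Set.ofList xs := by
        simp [PySem.Set.add, hmem]
      rw [hadd]
      refine List.Pairwise.imp_of_mem ?_ ih
      intro a b ha hb h
      rw [List.idxOf_append_of_mem ((PySem.Set.mem_ofList xs a).mp ha),
          List.idxOf_append_of_mem ((PySem.Set.mem_ofList xs b).mp hb)]
      exact h
    · have hmem : x ∉ PySem.Set.ofList xs := fun h => hx ((PySem.Set.mem_ofList xs x).mp h)
      have hadd : PySem.Set.add (PySem.Set.ofList xs) x = PySem.Set.ofList xs ++ [x] := by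
        simp [PySem.Set.add, hmem]
      rw [hadd, List.pairwise_append]
      refine ⟨?_, by simp, ?_⟩
      · refine List.Pairwise.imp_of_mem ?_ ih
        intro a b ha hb h
        rw [List.idxOf_append_of_mem ((PySem.Set.mem_ofList xs a).mp ha),
            List.idxOf_append_of_mem ((PySem.Set.mem_ofList xs b).mp hb)]
        exact h
      · intro a ha b hb
        have hb' : b = x := by simpa using hb
        subst hb'
        have haxs : a ∈ xs := (PySem.Set.mem_ofList xs a).mp ha
        rw [List.idxOf_append_of_mem haxs, List.idxOf_append_of_notMem hx]
        simpa using List.idxOf_lt_length_of_mem haxs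

-- ---- B's selection loop on a strictly f-increasing entry list is find? ----
theorem pvSelB_stay (k : Int) (E : List (Int × (Int × Int))) (s : Int × Int)
    (h : ∀ e ∈ E, ¬ (e.2.2 < s.2)) : E.foldl (pvSelB k) s = s := by
  induction E with
  | nil => rfl
  | cons e rest ih =>
    have he := h e (by simp)
    have h1 : pvSelB k s e = s := by simp [pvSelB, he]
    rw [List.foldl_cons, h1]
    exact ih (fun e' h' => h e' (List.mem_cons_of_mem _ h'))

theorem pvSelB_find (k : Int) (E : List (Int × (Int × Int)))
    (hp : E.Pairwise (fun a b => a.2.2 < b.2.2)) :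
    ∀ s : Int × Int, (∀ e ∈ E, e.2.2 < s.2) →
      (E.foldl (pvSelB k) s).1
        = ((E.find? (fun e => e.2.1 == k)).map (·.1)).getD s.1 := by
  induction E with
  | nil => intro s _; rfl
  | cons e rest ih =>
    intro s hb
    have hbe := hb e (by simp)
    rw [List.foldl_cons]
    by_cases hc : e.2.1 = k
    · have h1 : pvSelB k s e = (e.1, e.2.2) := by simp [pvSelB, hc, hbe]
      have h2 : (e.2.1 == k) = true := by simp [hc]
      rw [h1, pvSelB_stay k rest (e.1, e.2.2)
            (fun e' h' => not_lt.mpr (le_of_lt ((List.pairwise_cons.mp hp).1 e' h'))),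
          List.find?_cons, h2]
      rfl
    · have h1 : pvSelB k s e = s := by simp [pvSelB, hc]
      have h2 : (e.2.1 == k) = false := by simp [hc]
      rw [h1, List.find?_cons, h2,
          ih (List.pairwise_cons.mp hp).2 s (fun e' h' => hb e' (List.mem_cons_of_mem _ h'))]

-- ---- find? commutes with first-occurrence dedup ----
theorem find?_foldl_add (p : Int → Bool) (l : List Int) :
    ∀ s : List Int, ((l.foldl PySem.Set.add s).find? p) = (s.find? p).or (l.find? p) := by
  induction l with
  | nil => intro s; simp
  | cons x l ih =>
    intro s
    rw [List.foldl_cons, ih]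
    by_cases hx : x ∈ s
    · have hadd : PySem.Set.add s x = s := by simp [PySem.Set.add, hx]
      rw [hadd]
      cases hs : s.find? p with
      | some w => simp [Option.or]
      | none =>
        have hpx : p x = false := by simpa using List.find?_eq_none.mp hs x hx
        simp [hpx, Option.or]
    · have hadd : PySem.Set.add s x = s ++ [x] := by simp [PySem.Set.add, hx]
      rw [hadd, List.find?_append, Option.or_assoc]
      congr 1
      rw [List.find?_cons]
      cases hpx : p x <;> simp [List.find?, hpx, Option.or]

theorem find?_ofList (p : Int → Bool) (l : List Int) :
    (PySem.Set.ofList l).find? p = l.find? p := by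
  rw [PySem.Set.ofList_eq_foldl, find?_foldl_add]
  simp

-- ===== VERDICT (by name: the statement is the Claim_ definition above) =====
theorem find_first_k_repeats_spec : Claim_equal_find_first_k_repeats := by
  intro nums k _
  unfold Spec_find_first_k_repeats find_first_k_repeats find_first_k_repeats_alt
  rw [pvBuildFreqA_eq_counter, pvScanA_counter_eq_find?, pvBuildB_items]
  have hp : ((PySem.Set.ofList nums).map
        (fun v : Int => (v, ((nums.count v : Int), (nums.idxOf v : Int))))).Pairwise
        (fun a b => a.2.2 < b.2.2) := by
    rw [List.pairwise_map]
    refine (ofList_idx_pairwise nums).imp ?_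
    intro a b h
    simpa using h
  have hb : ∀ e ∈ (PySem.Set.ofList nums).map
        (fun v : Int => (v, ((nums.count v : Int), (nums.idxOf v : Int)))),
        e.2.2 < ((nums.length : Int)) := by
    intro e he
    rcases List.mem_map.mp he with ⟨v, hv, rfl⟩
    have hvm : v ∈ nums := (PySem.Set.mem_ofList nums v).mp hv
    simpa using List.idxOf_lt_length_of_mem hvm
  rw [pvSelB_find k _ hp _ hb, List.find?_map]
  rw [show ((fun e : Int × (Int × Int) => e.2.1 == k)
        ∘ (fun v : Int => (v, ((nums.count v : Int), (nums.idxOf v : Int)))))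
        = (fun n => (nums.count n : Int) == k) from rfl]
  rw [find?_ofList]
  cases h : nums.find? (fun n => (nums.count n : Int) == k) <;> simp
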